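-- pv_equiv track=rewrite | github.com/L-ebesgue/sparse_GPDs | archive.py | generate_poset
-- ===== SOURCE A (Python) =====
-- def is_smaller(node1, node2):
--     if node1[0] <= node2[0] and node1[1] <= node2[1]:
--         return True
--     else:
--         return False
--
-- def is_contained(interval_1, interval_2):
--     maximal_1 = (interval_1[0] + interval_1[5], interval_1[1] + interval_1[2])
--     maximal_2 = (interval_2[0] + interval_2[5], interval_2[1] + interval_2[2])
--
--     minimal_1 = tuple(set(((interval_1[0] - interval_1[3], interval_1[1]), (interval_1[0], interval_1[1] - interval_1[4]))))
--     minimal_2 = tuple(set(((interval_2[0] - interval_2[3], interval_2[1]), (interval_2[0], interval_2[1] - interval_2[4]))))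
--
--     for min_1 in minimal_1:
--         not_contained = True
--
--         for min_2 in minimal_2:
--             if is_smaller(min_2, min_1):
--                 not_contained = False
--                 break
--
--         if not_contained:
--             return False
--
--         not_contained = True
--
--     if not is_smaller(maximal_1, maximal_2):
--         return False
--
--     return True
--
-- def generate_poset(intervals):
--     num_intervals = len(intervals)
--
--     poset = [[-1 for j in range(num_intervals)] for i in range(num_intervals)]
--
--     for i in range(num_intervals):
--         poset[i][i] = 1
--
--     for i in range(num_intervals):
--         for j in range(num_intervals):
--             if poset[i][j] == -1:
--                 if is_contained(intervals[i], intervals[j]):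
--                     poset[i][j] = 1
--                     poset[j][i] = 0
--                 else:
--                     poset[i][j] = 0
--                     if is_contained(intervals[j], intervals[i]):
--                         poset[j][i] = 1
--                     else:
--                         poset[j][i] = 0
--     return poset
-- ===== SOURCE B (Python) =====
-- def generate_poset(intervals):
--     def corners(iv):
--         return ((iv[0] + iv[5], iv[1] + iv[2]),
--                 ((iv[0] - iv[3], iv[1]), (iv[0], iv[1] - iv[4])))
--
--     def contained(a, b):
--         maxa, minsa = corners(a)
--         maxb, minsb = corners(b)
--         if maxa[0] > maxb[0] or maxa[1] > maxb[1]: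
--             return False
--         return all(any(mb[0] <= ma[0] and mb[1] <= ma[1] for mb in minsb)
--                    for ma in minsa)
--
--     n = len(intervals)
--     return [[int(i == j or contained(intervals[i], intervals[j]))
--              for j in range(n)]
--             for i in range(n)]
-- ===== Notes on version B (the rewrite author's own statement) =====
-- stated objective: simpler
-- what changed: Replaces A's -1-sentinel single pass that mutates both poset[i][j] and poset[j][i] in place with a pure two-level comprehension over a direct corner-based containment predicate; Pre_ excludes intervals shorter than 6 entries when there are at least two (there A raises IndexError) and pairs of distinct mutually-containing intervals, a tie on which A's first-visit order picks which symmetric cell gets 1 while B marks both.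
import Mathlib
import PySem

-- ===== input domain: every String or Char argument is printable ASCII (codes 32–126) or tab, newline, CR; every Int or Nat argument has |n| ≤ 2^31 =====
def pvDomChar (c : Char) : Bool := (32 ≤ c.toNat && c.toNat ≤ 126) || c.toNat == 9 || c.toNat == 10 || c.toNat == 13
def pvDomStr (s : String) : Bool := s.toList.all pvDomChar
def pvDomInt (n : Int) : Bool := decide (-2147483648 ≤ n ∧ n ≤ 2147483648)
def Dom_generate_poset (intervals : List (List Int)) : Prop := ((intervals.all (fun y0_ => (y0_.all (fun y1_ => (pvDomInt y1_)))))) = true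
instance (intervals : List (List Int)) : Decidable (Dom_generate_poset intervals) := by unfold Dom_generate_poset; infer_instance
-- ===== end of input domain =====

-- B replaces A's -1-sentinel single pass that mutates poset[i][j] and poset[j][i] in place by a
-- pure two-level comprehension over a direct containment predicate on extracted corner data;
-- objective: simpler. Equivalence is about the return value only (A mutates only its own fresh lists).

-- ===== PORT A =====
-- iv[k] for the constant non-negative indices 0..5; exact whenever k < iv.length (guaranteed by Pre_)
def pvIdx (iv : List Int) (k : Nat) : Int := iv.getD k 0

def is_smaller (n1 n2 : Int × Int) : Bool := decide (n1.1 ≤ n2.1) && decide (n1.2 ≤ n2.2)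

-- tuple(set(((a0-a3,a1),(a0,a1-a4)))): the set's iteration order is consumed only by all/any below
def minimalsA (iv : List Int) : List (Int × Int) :=
  PySem.Set.ofList [(pvIdx iv 0 - pvIdx iv 3, pvIdx iv 1), (pvIdx iv 0, pvIdx iv 1 - pvIdx iv 4)]

-- the two break-flag loops are the obvious all/any folds
def is_contained (a b : List Int) : Bool :=
  let max1 := (pvIdx a 0 + pvIdx a 5, pvIdx a 1 + pvIdx a 2)
  let max2 := (pvIdx b 0 + pvIdx b 5, pvIdx b 1 + pvIdx b 2)
  if (minimalsA a).all (fun m1 => (minimalsA b).any (fun m2 => is_smaller m2 m1)) then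
    if is_smaller max1 max2 then true else false
  else false

-- poset[i][j] read/write (indices always in range in A's code)
def matget (m : List (List Int)) (i j : Nat) : Int := (m.getD i []).getD j 0
def matset (m : List (List Int)) (i j : Nat) (v : Int) : List (List Int) :=
  m.set i ((m.getD i []).set j v)

-- body of A's inner loop
def gpInner (intervals : List (List Int)) (i : Nat) (m : List (List Int)) (j : Nat) :
    List (List Int) :=
  if matget m i j = -1 then
    if is_contained (intervals.getD i []) (intervals.getD j []) then
      matset (matset m i j 1) j i 0
    else
      if is_contained (intervals.getD j []) (intervals.getD i []) then
        matset (matset m i j 0) j i 1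
      else
        matset (matset m i j 0) j i 0
  else m

def gpOuter (intervals : List (List Int)) (m : List (List Int)) (i : Nat) :
    List (List Int) :=
  (List.range intervals.length).foldl (gpInner intervals i) m

def generate_poset (intervals : List (List Int)) : List (List Int) :=
  let n := intervals.length
  let poset0 := (List.range n).map (fun _ => (List.range n).map (fun _ => (-1 : Int)))
  let poset1 := (List.range n).foldl (fun m i => matset m i i 1) poset0
  (List.range n).foldl (gpOuter intervals) poset1

-- ===== PORT B =====
-- corners(iv): the maximal corner and the two minimal corners of an interval
def cornersB (iv : List Int) : (Int × Int) × List (Int × Int) :=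
  ((iv.getD 0 0 + iv.getD 5 0, iv.getD 1 0 + iv.getD 2 0),
   [(iv.getD 0 0 - iv.getD 3 0, iv.getD 1 0), (iv.getD 0 0, iv.getD 1 0 - iv.getD 4 0)])

def containedB (a b : List Int) : Bool :=
  let fa := cornersB a
  let fb := cornersB b
  if decide (fb.1.1 < fa.1.1) || decide (fb.1.2 < fa.1.2) then false
  else fa.2.all (fun ma => fb.2.any (fun mb => decide (mb.1 ≤ ma.1) && decide (mb.2 ≤ ma.2)))

def generate_poset_alt (intervals : List (List Int)) : List (List Int) :=
  let n := intervals.length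
  (List.range n).map (fun i => (List.range n).map (fun j =>
    if i = j ∨ containedB (intervals.getD i []) (intervals.getD j []) = true
    then (1 : Int) else 0))

-- ===== PRECONDITION & SPEC =====
-- containment predicate for Pre_ only (pairwise corner comparison, independent of both ports)
def pvContains (a b : List Int) : Bool :=
  decide (a.getD 0 0 + a.getD 5 0 ≤ b.getD 0 0 + b.getD 5 0) &&
  decide (a.getD 1 0 + a.getD 2 0 ≤ b.getD 1 0 + b.getD 2 0) &&
  ([(a.getD 0 0 - a.getD 3 0, a.getD 1 0), (a.getD 0 0, a.getD 1 0 - a.getD 4 0)]).all (fun ma =>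
   ([(b.getD 0 0 - b.getD 3 0, b.getD 1 0), (b.getD 0 0, b.getD 1 0 - b.getD 4 0)]).any (fun mb =>
     decide (mb.1 ≤ ma.1) && decide (mb.2 ≤ ma.2)))

-- Pre_ excludes (1) inputs with at least two intervals one of which has fewer than 6 entries —
-- exactly where A raises IndexError — and (2) inputs with two distinct intervals that mutually
-- contain each other, a tie on which A's sentinel first-visit order gives 1 to one of the two
-- symmetric cells and 0 to the other — a choice no one would specify — while B marks both cells 1.
def Pre_generate_poset (intervals : List (List Int)) : Prop :=
  (intervals.length ≤ 1 ∨ ∀ iv ∈ intervals, 6 ≤ iv.length) ∧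
  ∀ i ∈ List.range intervals.length, ∀ j ∈ List.range intervals.length, i ≠ j →
    ¬(pvContains (intervals.getD i []) (intervals.getD j []) = true ∧
      pvContains (intervals.getD j []) (intervals.getD i []) = true)
instance (intervals : List (List Int)) : Decidable (Pre_generate_poset intervals) := by
  unfold Pre_generate_poset; infer_instance

def pvWitness_generate_poset : List (List Int) :=
  [[0, 0, 1, 1, 1, 1], [0, 0, 2, 1, 1, 2], [5, 5, 1, 1, 1, 1]]

def Spec_generate_poset (intervals : List (List Int)) (out : List (List Int)) : Prop :=
  out = generate_poset_alt intervals
instance (intervals : List (List Int)) (out : List (List Int)) :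
    Decidable (Spec_generate_poset intervals out) := by unfold Spec_generate_poset; infer_instance

-- ===== CLAIM (what is proved, stated in full; the proofs are below) =====
def Claim_equal_generate_poset : Prop :=
  ∀ (intervals : List (List Int)), Dom_generate_poset intervals →
    Pre_generate_poset intervals →
    Spec_generate_poset intervals (generate_poset intervals)

-- ===== LEMMAS AND PROOFS =====

-- A's containment test, as a function of interval indices
def cA (ivs : List (List Int)) (p q : Nat) : Bool :=
  is_contained (ivs.getD p []) (ivs.getD q [])

-- closed form of the entry A leaves at (p, q)
def entryA (ivs : List (List Int)) (p q : Nat) : Int :=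
  if p = q then 1
  else if p < q then (if cA ivs p q then 1 else 0)
  else if cA ivs q p then 0 else (if cA ivs p q then 1 else 0)

def tgt (ivs : List (List Int)) : List (List Int) :=
  (List.range ivs.length).map (fun i =>
    (List.range ivs.length).map (fun j => entryA ivs i j))

-- cells already holding their final value after processing rows < i and, in row i, columns < j
def FF (i j p q : Nat) : Bool :=
  p == q || decide (p < i) || decide (q < i) ||
  (p == i && decide (q < j)) || (q == i && decide (p < j))

def InvM (ivs : List (List Int)) (i j : Nat) (m : List (List Int)) : Prop :=
  m.length = ivs.length ∧
  (∀ p, p < ivs.length → (m.getD p []).length = ivs.length) ∧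
  (∀ p q, p < ivs.length → q < ivs.length →
    matget m p q = if FF i j p q then entryA ivs p q else -1)

lemma length_matset (m : List (List Int)) (i j : Nat) (v : Int) :
    (matset m i j v).length = m.length := by
  simp [matset]

lemma row_matset (m : List (List Int)) (i j p : Nat) (v : Int) (hi : i < m.length) :
    (matset m i j v).getD p [] =
      if p = i then (m.getD i []).set j v else m.getD p [] := by
  unfold matset
  by_cases hp : p = i
  · subst hp
    rw [if_pos rfl, List.getD_eq_getElem?_getD, List.getElem?_set_self (by omega)]
    simp
  · rw [if_neg hp, List.getD_eq_getElem?_getD, List.getElem?_set_ne (by omega : i ≠ p),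
      List.getD_eq_getElem?_getD]

lemma matget_matset (m : List (List Int)) (i j p q : Nat) (v : Int)
    (hi : i < m.length) (hj : j < (m.getD i []).length) :
    matget (matset m i j v) p q = if p = i ∧ q = j then v else matget m p q := by
  unfold matget
  rw [row_matset m i j p v hi]
  by_cases hp : p = i
  · subst hp
    rw [if_pos rfl]
    by_cases hq : q = j
    · subst hq
      rw [List.getD_eq_getElem?_getD, List.getElem?_set_self (by omega)]
      simp
    · rw [List.getD_eq_getElem?_getD, List.getElem?_set_ne (by omega : j ≠ q),
        ← List.getD_eq_getElem?_getD]
      simp [hq]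
  · simp [hp]

lemma entryA_of_lt (ivs : List (List Int)) (i j : Nat) (h : i < j) :
    entryA ivs i j = if cA ivs i j then 1 else 0 := by
  unfold entryA; rw [if_neg (by omega), if_pos h]

lemma entryA_of_gt (ivs : List (List Int)) (i j : Nat) (h : j < i) :
    entryA ivs i j = if cA ivs j i then 0 else if cA ivs i j then 1 else 0 := by
  unfold entryA; rw [if_neg (by omega), if_neg (by omega)]

lemma entryA_ne_neg_one (ivs : List (List Int)) (p q : Nat) :
    entryA ivs p q ≠ -1 := by
  unfold entryA; split_ifs <;> decide

lemma all_ofList (l : List (Int × Int)) (p : Int × Int → Bool) :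
    (PySem.Set.ofList l).all p = l.all p := by
  rw [Bool.eq_iff_iff]
  simp [List.all_eq_true, PySem.Set.mem_ofList]

lemma any_ofList (l : List (Int × Int)) (p : Int × Int → Bool) :
    (PySem.Set.ofList l).any p = l.any p := by
  rw [Bool.eq_iff_iff]
  simp [List.any_eq_true, PySem.Set.mem_ofList]

lemma containedB_eq (a b : List Int) : containedB a b = is_contained a b := by
  unfold containedB cornersB
  unfold is_contained minimalsA is_smaller
  simp only [all_ofList, any_ofList]
  rw [show pvIdx = fun iv k => iv.getD k 0 from rfl]
  rw [Bool.eq_iff_iff]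
  split_ifs <;> simp_all <;> omega

lemma pvContains_eq (a b : List Int) : pvContains a b = is_contained a b := by
  unfold pvContains
  unfold is_contained minimalsA is_smaller
  simp only [all_ofList, any_ofList]
  rw [show pvIdx = fun iv k => iv.getD k 0 from rfl]
  rw [Bool.eq_iff_iff]
  split_ifs <;> simp_all

lemma diag_step (ivs : List (List Int)) (i : Nat) (hi : i < ivs.length)
    (m : List (List Int))
    (hlen : m.length = ivs.length)
    (hrows : ∀ p, p < ivs.length → (m.getD p []).length = ivs.length)
    (hent : ∀ p q, p < ivs.length → q < ivs.length →
        matget m p q = if p = q ∧ p < i then entryA ivs p q else -1) :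
    (matset m i i 1).length = ivs.length ∧
    (∀ p, p < ivs.length → ((matset m i i 1).getD p []).length = ivs.length) ∧
    (∀ p q, p < ivs.length → q < ivs.length →
        matget (matset m i i 1) p q = if p = q ∧ p < i + 1 then entryA ivs p q else -1) := by
  have hil : i < m.length := by omega
  have hjl : i < (m.getD i []).length := by rw [hrows i hi]; omega
  refine ⟨by rw [length_matset, hlen], ?_, ?_⟩
  · intro p hp
    rw [row_matset m i i p 1 hil]
    split_ifs with h
    · rw [List.length_set]; subst h; exact hrows p hp
    · exact hrows p hp
  · intro p q hp hq
    rw [matget_matset m i i p q 1 hil hjl, hent p q hp hq]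
    by_cases h : p = i ∧ q = i
    · have h1 : entryA ivs p q = 1 := by
        unfold entryA; rw [if_pos (by omega : p = q)]
      rw [if_pos h, if_pos (by omega), h1]
    · rw [if_neg h]
      apply if_congr (by omega) rfl rfl

lemma diag_fold (ivs : List (List Int)) :
    ∀ (k j : Nat) (m : List (List Int)), j + k = ivs.length →
    (m.length = ivs.length ∧
     (∀ p, p < ivs.length → (m.getD p []).length = ivs.length) ∧
     (∀ p q, p < ivs.length → q < ivs.length →
        matget m p q = if p = q ∧ p < j then entryA ivs p q else -1)) →
    InvM ivs 0 0 ((List.range' j k).foldl (fun m i => matset m i i 1) m) := by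
  intro k
  induction k with
  | zero =>
    intro j m hjk ⟨h1, h2, h3⟩
    rw [List.range'_zero, List.foldl_nil]
    refine ⟨h1, h2, ?_⟩
    intro p q hp hq
    rw [h3 p q hp hq]
    apply if_congr _ rfl rfl
    simp only [FF, Bool.or_eq_true, Bool.and_eq_true, decide_eq_true_eq, beq_iff_eq]; omega
  | succ k ih =>
    intro j m hjk ⟨h1, h2, h3⟩
    rw [List.range'_succ, List.foldl_cons]
    exact ih (j + 1) _ (by omega) (diag_step ivs j (by omega) m h1 h2 h3)

lemma inner_step (ivs : List (List Int)) (i j : Nat)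
    (hi : i < ivs.length) (hj : j < ivs.length) (m : List (List Int))
    (h : InvM ivs i j m) : InvM ivs i (j + 1) (gpInner ivs i m j) := by
  obtain ⟨hlen, hrows, hent⟩ := h
  have hm : matget m i j = if FF i j i j then entryA ivs i j else -1 := hent i j hi hj
  unfold gpInner
  by_cases hff : FF i j i j = true
  · -- cell (i, j) is already final (i = j or j < i): the guard fails, m is unchanged
    rw [hm, if_pos hff, if_neg (entryA_ne_neg_one ivs i j)]
    refine ⟨hlen, hrows, ?_⟩
    intro p q hp hq
    rw [hent p q hp hq]
    apply if_congr _ rfl rfl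
    simp only [FF, Bool.or_eq_true, Bool.and_eq_true, decide_eq_true_eq, beq_iff_eq] at hff ⊢; omega
  · -- i < j: the guard holds and the pair (i, j), (j, i) is written with its final values
    have hij : i < j := by simp only [FF, Bool.or_eq_true, Bool.and_eq_true, decide_eq_true_eq, beq_iff_eq] at hff; omega
    rw [hm, if_neg hff, if_pos rfl]
    have key : ∀ v1 v2 : Int, v1 = entryA ivs i j → v2 = entryA ivs j i →
        InvM ivs i (j + 1) (matset (matset m i j v1) j i v2) := by
      intro v1 v2 hv1 hv2
      have hil : i < m.length := by omega
      have hjrow : j < (m.getD i []).length := by rw [hrows i hi]; omega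
      have hjl : j < (matset m i j v1).length := by rw [length_matset]; omega
      have hrowj : (matset m i j v1).getD j [] = m.getD j [] := by
        rw [row_matset m i j j v1 hil, if_neg (by omega)]
      have hirow : i < ((matset m i j v1).getD j []).length := by
        rw [hrowj, hrows j hj]; omega
      refine ⟨by rw [length_matset, length_matset, hlen], ?_, ?_⟩
      · intro p hp
        rw [row_matset _ j i p v2 hjl, row_matset m i j p v1 hil]
        by_cases h1 : p = j
        · rw [if_pos h1, List.length_set, hrowj, hrows j hj]
        · rw [if_neg h1]
          by_cases h2 : p = i
          · rw [if_pos h2, List.length_set, hrows i hi]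
          · rw [if_neg h2]
            exact hrows p hp
      · intro p q hp hq
        rw [matget_matset _ j i p q v2 hjl hirow, matget_matset m i j p q v1 hil hjrow]
        by_cases h1 : p = j ∧ q = i
        · rw [if_pos h1, if_pos (by simp only [FF, Bool.or_eq_true, Bool.and_eq_true, decide_eq_true_eq, beq_iff_eq]; omega), hv2, h1.1, h1.2]
        · rw [if_neg h1]
          by_cases h2 : p = i ∧ q = j
          · rw [if_pos h2, if_pos (by simp only [FF, Bool.or_eq_true, Bool.and_eq_true, decide_eq_true_eq, beq_iff_eq]; omega), hv1, h2.1, h2.2]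
          · rw [if_neg h2, hent p q hp hq]
            apply if_congr _ rfl rfl
            simp only [FF, Bool.or_eq_true, Bool.and_eq_true, decide_eq_true_eq, beq_iff_eq]; omega
    by_cases hc1 : is_contained (ivs.getD i []) (ivs.getD j []) = true
    · rw [if_pos hc1]
      have c1 : cA ivs i j = true := hc1
      apply key
      · rw [entryA_of_lt ivs i j hij]; simp [c1]
      · rw [entryA_of_gt ivs j i hij]; simp [c1]
    · rw [if_neg hc1]
      have c1 : cA ivs i j = false := by
        rw [← Bool.not_eq_true]; exact hc1
      by_cases hc2 : is_contained (ivs.getD j []) (ivs.getD i []) = true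
      · rw [if_pos hc2]
        have c2 : cA ivs j i = true := hc2
        apply key
        · rw [entryA_of_lt ivs i j hij]; simp [c1]
        · rw [entryA_of_gt ivs j i hij]; simp [c1, c2]
      · rw [if_neg hc2]
        have c2 : cA ivs j i = false := by
          rw [← Bool.not_eq_true]; exact hc2
        apply key
        · rw [entryA_of_lt ivs i j hij]; simp [c1]
        · rw [entryA_of_gt ivs j i hij]; simp [c1, c2]

lemma inner_fold (ivs : List (List Int)) (i : Nat) (hi : i < ivs.length) :
    ∀ (k j : Nat) (m : List (List Int)), j + k = ivs.length → InvM ivs i j m →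
    InvM ivs i ivs.length ((List.range' j k).foldl (gpInner ivs i) m) := by
  intro k
  induction k with
  | zero =>
    intro j m hjk h
    rw [List.range'_zero, List.foldl_nil]
    obtain rfl : j = ivs.length := by omega
    exact h
  | succ k ih =>
    intro j m hjk h
    rw [List.range'_succ, List.foldl_cons]
    exact ih (j + 1) _ (by omega) (inner_step ivs i j hi (by omega) m h)

lemma reindex (ivs : List (List Int)) (i : Nat) (m : List (List Int))
    (h : InvM ivs i ivs.length m) : InvM ivs (i + 1) 0 m := by
  obtain ⟨h1, h2, h3⟩ := h
  refine ⟨h1, h2, ?_⟩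
  intro p q hp hq
  rw [h3 p q hp hq]
  apply if_congr _ rfl rfl
  simp only [FF, Bool.or_eq_true, Bool.and_eq_true, decide_eq_true_eq, beq_iff_eq]; omega

lemma outer_fold (ivs : List (List Int)) :
    ∀ (k i : Nat) (m : List (List Int)), i + k = ivs.length → InvM ivs i 0 m →
    InvM ivs ivs.length 0 ((List.range' i k).foldl (gpOuter ivs) m) := by
  intro k
  induction k with
  | zero =>
    intro i m hik h
    rw [List.range'_zero, List.foldl_nil]
    obtain rfl : i = ivs.length := by omega
    exact h
  | succ k ih =>
    intro i m hik h
    rw [List.range'_succ, List.foldl_cons]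
    refine ih (i + 1) _ (by omega) ?_
    apply reindex
    unfold gpOuter
    rw [List.range_eq_range']
    exact inner_fold ivs i (by omega) ivs.length 0 m (by omega) h

lemma final_of_inv (ivs : List (List Int)) (m : List (List Int))
    (h : InvM ivs ivs.length 0 m) : m = tgt ivs := by
  obtain ⟨h1, h2, h3⟩ := h
  apply List.ext_getElem?
  intro p
  by_cases hp : p < ivs.length
  · have hrow : m.getD p [] = (List.range ivs.length).map (fun j => entryA ivs p j) := by
      apply List.ext_getElem?
      intro q
      by_cases hq : q < ivs.length
      · have hql : q < (m.getD p []).length := by rw [h2 p hp]; exact hq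
        have hval : (m.getD p [])[q] = entryA ivs p q := by
          rw [← List.getD_eq_getElem (m.getD p []) 0 hql]
          have := h3 p q hp hq
          unfold matget at this
          rw [this, if_pos (by simp only [FF, Bool.or_eq_true, Bool.and_eq_true,
            decide_eq_true_eq, beq_iff_eq]; omega)]
        rw [List.getElem?_eq_getElem hql, hval]
        simp [hq]
      · rw [List.getElem?_eq_none (by rw [h2 p hp]; omega)]
        symm
        apply List.getElem?_eq_none
        simp; omega
    have hpl : p < m.length := by omega
    rw [List.getElem?_eq_getElem hpl, ← List.getD_eq_getElem m [] hpl, hrow]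
    simp [tgt, hp]
  · rw [List.getElem?_eq_none (by omega)]
    symm
    apply List.getElem?_eq_none
    simp [tgt]; omega

lemma outer_fold' (ivs : List (List Int)) (m : List (List Int)) (h : InvM ivs 0 0 m) :
    InvM ivs ivs.length 0 ((List.range ivs.length).foldl (gpOuter ivs) m) := by
  rw [List.range_eq_range']
  exact outer_fold ivs ivs.length 0 m (by omega) h

lemma diag_fold' (ivs : List (List Int)) (m : List (List Int))
    (h : m.length = ivs.length ∧
     (∀ p, p < ivs.length → (m.getD p []).length = ivs.length) ∧
     (∀ p q, p < ivs.length → q < ivs.length → matget m p q = -1)) :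
    InvM ivs 0 0 ((List.range ivs.length).foldl (fun m i => matset m i i 1) m) := by
  rw [List.range_eq_range']
  refine diag_fold ivs ivs.length 0 m (by omega) ⟨h.1, h.2.1, ?_⟩
  intro p q hp hq
  rw [h.2.2 p q hp hq, if_neg (by omega)]

lemma genA_eq_tgt (ivs : List (List Int)) : generate_poset ivs = tgt ivs := by
  unfold generate_poset
  dsimp only
  apply final_of_inv
  apply outer_fold'
  apply diag_fold'
  have hrow : ∀ p, p < ivs.length →
      ((List.range ivs.length).map
        (fun _ => (List.range ivs.length).map (fun _ => (-1 : Int)))).getD p [] =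
        (List.range ivs.length).map (fun _ => (-1 : Int)) := by
    intro p hp
    rw [List.getD_eq_getElem _ _ (by simpa using hp), List.getElem_map]
  refine ⟨by simp, ?_, ?_⟩
  · intro p hp; rw [hrow p hp]; simp
  · intro p q hp hq
    unfold matget
    rw [hrow p hp, List.getD_eq_getElem _ _ (by simpa using hq), List.getElem_map]

lemma genB_eq_tgt (ivs : List (List Int))
    (h : ∀ i j, i < ivs.length → j < ivs.length → i ≠ j →
      ¬(cA ivs i j = true ∧ cA ivs j i = true)) :
    generate_poset_alt ivs = tgt ivs := by
  unfold generate_poset_alt tgt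
  apply List.map_congr_left
  intro i hi
  rw [List.mem_range] at hi
  apply List.map_congr_left
  intro j hj
  rw [List.mem_range] at hj
  rw [containedB_eq]
  show (if i = j ∨ cA ivs i j = true then (1 : Int) else 0) = entryA ivs i j
  by_cases hij : i = j
  · rw [if_pos (Or.inl hij)]
    unfold entryA; rw [if_pos hij]
  · rcases Nat.lt_or_ge i j with hlt | hge
    · rw [entryA_of_lt ivs i j hlt]
      cases hc1 : cA ivs i j <;> simp [hij]
    · have hgt : j < i := by omega
      rw [entryA_of_gt ivs i j hgt]
      have hnm := h i j hi hj hij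
      cases hc1 : cA ivs i j <;> cases hc2 : cA ivs j i <;>
        simp_all

-- ===== VERDICT (by name: the statement is the Claim_ definition above) =====
theorem generate_poset_spec : Claim_equal_generate_poset := by
  intro ivs _ hpre
  unfold Spec_generate_poset
  rw [genA_eq_tgt]
  rw [genB_eq_tgt]
  intro i j hi hj hij hc
  have := hpre.2 i (List.mem_range.mpr hi) j (List.mem_range.mpr hj) hij
  apply this
  rw [pvContains_eq, pvContains_eq]
  exact hc
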